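-- pv_equiv track=rewrite | github.com/tonyqug/HAII | 03_learning_service/learning_service/generation.py | _question_types_for_mode
-- ===== SOURCE A (Python) =====
-- from typing import Any, Dict, Iterable, List, Optional, Sequence, Tuple
--
-- def _question_types_for_mode(generation_mode: str, count: int, template_items_present: bool) -> List[str]:
--     if generation_mode == "multiple_choice":
--         return ["multiple_choice"] * count
--     if generation_mode == "short_answer":
--         return ["short_answer"] * count
--     if generation_mode == "long_answer":
--         return ["long_answer"] * count
--     if generation_mode == "mixed":
--         sequence = ["multiple_choice", "short_answer", "long_answer"]
--         return [sequence[index % len(sequence)] for index in range(count)]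
--     # template mimic defaults to mixed to preserve style variety.
--     return ["short_answer" if index % 2 == 0 else "long_answer" for index in range(count)]
-- ===== SOURCE B (Python) =====
-- def _question_types_for_mode(generation_mode: str, count: int, template_items_present: bool):
--     # Classify the mode into a cycle of question types, then consume a rotating
--     # queue: emit the front element and rotate it to the back, once per question.
--     if generation_mode in ("multiple_choice", "short_answer", "long_answer"):
--         cycle = [generation_mode]
--     elif generation_mode == "mixed":
--         cycle = ["multiple_choice", "short_answer", "long_answer"]
--     else:
--         cycle = ["short_answer", "long_answer"]
--     out = []
--     remaining = count
--     while remaining > 0: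
--         head = cycle[0]
--         cycle = cycle[1:] + [head]
--         out.append(head)
--         remaining -= 1
--     return out
-- ===== Notes on version B (the rewrite author's own statement) =====
-- stated objective: alternative
-- what changed: A builds each mode's list by list multiplication or modular-index comprehensions over range(count); B never indexes or takes a modulus: it classifies the mode into a cycle list, then runs one while-loop over a rotating queue (pop the front, rotate it to the back, append it to the output) until count elements are emitted.
import Mathlib
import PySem

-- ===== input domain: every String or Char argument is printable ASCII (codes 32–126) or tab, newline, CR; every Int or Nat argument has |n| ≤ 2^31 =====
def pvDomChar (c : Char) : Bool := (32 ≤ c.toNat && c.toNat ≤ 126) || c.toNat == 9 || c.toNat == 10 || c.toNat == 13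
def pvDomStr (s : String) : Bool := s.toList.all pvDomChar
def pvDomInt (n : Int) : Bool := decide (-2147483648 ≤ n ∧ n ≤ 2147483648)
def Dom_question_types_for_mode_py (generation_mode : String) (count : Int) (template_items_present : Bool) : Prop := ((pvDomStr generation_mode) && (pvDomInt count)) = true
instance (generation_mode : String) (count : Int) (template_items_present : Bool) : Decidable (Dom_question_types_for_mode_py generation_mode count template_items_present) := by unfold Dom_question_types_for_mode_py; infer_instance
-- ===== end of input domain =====

-- B replaces A's per-mode list multiplication / modular-index comprehensions with a
-- single rotating-queue loop over a mode-classified cycle (objective: alternative).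

-- ===== PORT A =====
def question_types_for_mode_py (generation_mode : String) (count : Int) (template_items_present : Bool) : List String :=
  if generation_mode = "multiple_choice" then List.replicate count.toNat "multiple_choice"
  else if generation_mode = "short_answer" then List.replicate count.toNat "short_answer"
  else if generation_mode = "long_answer" then List.replicate count.toNat "long_answer"
  else if generation_mode = "mixed" then
    let sequence := ["multiple_choice", "short_answer", "long_answer"]
    -- index % len(sequence) is always in range, so the default "" of pyGetD is never used
    (PySem.List.pyRange 0 count 1).map
      (fun index => PySem.List.pyGetD sequence (PySem.Int.mod index (PySem.List.len sequence)) "")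
  else
    (PySem.List.pyRange 0 count 1).map
      (fun index => if PySem.Int.mod index 2 = 0 then "short_answer" else "long_answer")

-- ===== PORT B =====
-- the while-loop of Source B: emit cycle[0], rotate it to the back (cycle[1:] + [head]),
-- count down remaining; cycle is never empty, so cycle[0] (pyGetD default "") never raises
def pvRotGo (cycle : List String) (remaining : Int) : List String :=
  if h : 0 < remaining then
    let head := PySem.List.pyGetD cycle 0 ""
    head :: pvRotGo (PySem.List.slice cycle (some 1) none ++ [head]) (remaining - 1)
  else []
termination_by remaining.toNat
decreasing_by omega

def question_types_for_mode_py_alt (generation_mode : String) (count : Int) (template_items_present : Bool) : List String :=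
  let cycle :=
    if generation_mode = "multiple_choice" ∨ generation_mode = "short_answer" ∨ generation_mode = "long_answer" then
      [generation_mode]
    else if generation_mode = "mixed" then ["multiple_choice", "short_answer", "long_answer"]
    else ["short_answer", "long_answer"]
  pvRotGo cycle count

-- ===== PRECONDITION & SPEC =====
def Spec_question_types_for_mode_py (generation_mode : String) (count : Int) (template_items_present : Bool) (out : List String) : Prop := out = question_types_for_mode_py_alt generation_mode count template_items_present
instance (generation_mode : String) (count : Int) (template_items_present : Bool) (out : List String) : Decidable (Spec_question_types_for_mode_py generation_mode count template_items_present out) := by unfold Spec_question_types_for_mode_py; infer_instance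

-- ===== CLAIM =====
def Claim_equal_question_types_for_mode_py : Prop := ∀ (generation_mode : String) (count : Int) (template_items_present : Bool), Dom_question_types_for_mode_py generation_mode count template_items_present → Spec_question_types_for_mode_py generation_mode count template_items_present (question_types_for_mode_py generation_mode count template_items_present)

-- ===== LEMMAS AND PROOFS =====

-- rotating a nonempty list shifts the cyclic index by one
theorem rot_getD (x : String) (xs : List String) (k : Nat) :
    (PySem.List.slice (x :: xs) (some 1) none ++ [PySem.List.pyGetD (x :: xs) 0 ""]).getD
        (k % (x :: xs).length) ""
      = (x :: xs).getD ((k + 1) % (x :: xs).length) "" := by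
  rw [PySem.List.slice_from_one]
  simp only [List.tail_cons, PySem.List.pyGetD_zero, List.getD_cons_zero, List.length_cons]
  set L := xs.length + 1 with hL
  have hk : k % L < L := Nat.mod_lt _ (by omega)
  by_cases hm : k % L < xs.length
  · have h1 : (k + 1) % L = k % L + 1 := by
      rw [Nat.add_mod, Nat.mod_eq_of_lt (show 1 < L by omega),
        Nat.mod_eq_of_lt (show k % L + 1 < L by omega)]
    rw [h1, List.getD_cons_succ]
    simp [List.getD_eq_getElem?_getD, List.getElem?_append_left hm]
  · have he : k % L = xs.length := by omega
    have h1 : (k + 1) % L = 0 := by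
      rw [Nat.add_mod, he]
      by_cases hL1 : L = 1
      · simp [hL1, Nat.mod_one]
      · rw [Nat.mod_eq_of_lt (show 1 < L by omega), ← hL, Nat.mod_self]
    rw [h1, he, List.getD_cons_zero]
    simp [List.getD_eq_getElem?_getD]

-- pvRotGo characterised by cyclic indexing into the starting cycle
theorem rotGo_eq : ∀ (n : Nat) (c : List String), c ≠ [] → ∀ (r : Int), r.toNat = n →
    pvRotGo c r = (List.range n).map (fun k => c.getD (k % c.length) "") := by
  intro n
  induction n with
  | zero =>
    intro c _ r hr
    rw [pvRotGo, dif_neg (by omega)]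
    simp
  | succ n ih =>
    intro c hc r hr
    obtain ⟨x, xs, rfl⟩ : ∃ x xs, c = x :: xs := by
      cases c with
      | nil => exact absurd rfl hc
      | cons x xs => exact ⟨x, xs, rfl⟩
    have hr0 : 0 < r := by omega
    rw [pvRotGo, dif_pos hr0]
    dsimp only
    have hc' : PySem.List.slice (x :: xs) (some 1) none ++ [PySem.List.pyGetD (x :: xs) 0 ""] ≠ [] := by
      simp [PySem.List.slice_from_one]
    have hlen : (PySem.List.slice (x :: xs) (some 1) none ++ [PySem.List.pyGetD (x :: xs) 0 ""]).length
        = (x :: xs).length := by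
      simp [PySem.List.slice_from_one]
    rw [ih _ hc' (r - 1) (by omega)]
    rw [List.range_succ_eq_map, List.map_cons, List.map_map]
    congr 1
    · simp [PySem.List.pyGetD_zero]
    · refine List.map_congr_left (fun k _ => ?_)
      simp only [Function.comp, hlen]
      rw [rot_getD]

-- the cyclic map over a one-element cycle is list repetition
theorem map_cycle_one (n : Nat) (s : String) :
    (List.range n).map (fun k => [s].getD (k % [s].length) "") = List.replicate n s := by
  simp [Nat.mod_one]

-- ===== VERDICT =====
theorem question_types_for_mode_py_spec : Claim_equal_question_types_for_mode_py := by
  intro gm count tip _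
  unfold Spec_question_types_for_mode_py question_types_for_mode_py question_types_for_mode_py_alt
  dsimp only
  by_cases h1 : gm = "multiple_choice"
  · subst h1
    rw [if_pos rfl, if_pos (Or.inl rfl),
      rotGo_eq count.toNat _ (by simp) count rfl, map_cycle_one]
  by_cases h2 : gm = "short_answer"
  · subst h2
    rw [if_neg h1, if_pos rfl, if_pos (Or.inr (Or.inl rfl)),
      rotGo_eq count.toNat _ (by simp) count rfl, map_cycle_one]
  by_cases h3 : gm = "long_answer"
  · subst h3
    rw [if_neg h1, if_neg h2, if_pos rfl, if_pos (Or.inr (Or.inr rfl)),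
      rotGo_eq count.toNat _ (by simp) count rfl, map_cycle_one]
  by_cases h4 : gm = "mixed"
  · subst h4
    rw [if_neg h1, if_neg h2, if_neg h3, if_pos rfl, if_neg (by tauto), if_pos rfl,
      rotGo_eq count.toNat _ (by simp) count rfl,
      PySem.List.pyRange_one, List.map_map]
    rw [show ((count - 0).toNat) = count.toNat by omega]
    refine List.map_congr_left (fun k _ => ?_)
    simp only [Function.comp_apply, zero_add]
    have h3' : PySem.Int.mod (k : Int)
        (PySem.List.len ["multiple_choice", "short_answer", "long_answer"]) = ((k % 3 : Nat) : Int) := by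
      simp only [PySem.List.len_eq, List.length_cons, List.length_nil]
      exact_mod_cast PySem.Int.mod_natCast k 3
    rw [h3', PySem.List.pyGetD_natCast]
    rfl
  · rw [if_neg h1, if_neg h2, if_neg h3, if_neg h4, if_neg (by tauto), if_neg h4,
      rotGo_eq count.toNat _ (by simp) count rfl,
      PySem.List.pyRange_one, List.map_map]
    rw [show ((count - 0).toNat) = count.toNat by omega]
    refine List.map_congr_left (fun k _ => ?_)
    simp only [Function.comp_apply, zero_add]
    have hm : PySem.Int.mod (k : Int) 2 = ((k % 2 : Nat) : Int) := by
      exact_mod_cast PySem.Int.mod_natCast k 2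
    rw [hm]
    rcases Nat.mod_two_eq_zero_or_one k with h | h <;> simp [h]
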